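-- pv_equiv track=rewrite | github.com/JohnTSpeare/anagrams | anagrams/anagrams.py | words_to_nums
-- ===== SOURCE A (Python) =====
-- def words_to_nums(word_list, letters):
--     """Converts list of words to list of list of numbers mapping to index
--     values of user's original word-or-phrase, taking duplicate letters into
--     account.
--     """
--     number_list = []
--     char_list = {}
--     for i in range(len(letters)):
--         char = letters[i]
--         char_list.setdefault(char, [])
--         char_list[char].append(i)
--     for word in word_list:
--         number_list += word_to_nums(word, char_list)
--
--     return number_list
--
-- def word_to_nums(word, char_list):
--     nums = []
--     number_lists = []
--     for char in word:
--         number_lists.append(char_list[char])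
--
--     nums = _expand_number_list(number_lists)
--
--     return nums
--
-- def _expand_number_list(number_lists):
--     if not number_lists:
--         return []
--     elif len(number_lists) == 1:
--         return [[num] for num in number_lists[0]]
--     expanded_number_list = []
--     expanded_sub_list = _expand_number_list(number_lists[1:])
--     for num in number_lists[0]:
--         for l in expanded_sub_list:
--             if not num in l:
--                 expanded_number_list.append([num] + l)
--     return expanded_number_list
-- ===== SOURCE B (Python) =====
-- def words_to_nums(word_list, letters):
--     """Iterative product-with-pruning: extend partial assignments one character
--     at a time instead of A's suffix recursion over number_lists."""
--     char_list = {}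
--     for i in range(len(letters)):
--         char = letters[i]
--         char_list.setdefault(char, [])
--         char_list[char].append(i)
--     number_list = []
--     for word in word_list:
--         if not word:
--             continue
--         partials = [[]]
--         for char in word:
--             options = char_list[char]
--             partials = [p + [n] for p in partials for n in options if n not in p]
--         number_list += partials
--     return number_list
-- ===== Notes on version B (the rewrite author's own statement) =====
-- stated objective: alternative
-- what changed: Replaces A's suffix recursion (_expand_number_list) that builds assignments back-to-front with an iterative front-to-back product: a list of partial assignments is extended one character at a time, pruning repeated indices as they appear; empty words are skipped explicitly.
import Mathlib
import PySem

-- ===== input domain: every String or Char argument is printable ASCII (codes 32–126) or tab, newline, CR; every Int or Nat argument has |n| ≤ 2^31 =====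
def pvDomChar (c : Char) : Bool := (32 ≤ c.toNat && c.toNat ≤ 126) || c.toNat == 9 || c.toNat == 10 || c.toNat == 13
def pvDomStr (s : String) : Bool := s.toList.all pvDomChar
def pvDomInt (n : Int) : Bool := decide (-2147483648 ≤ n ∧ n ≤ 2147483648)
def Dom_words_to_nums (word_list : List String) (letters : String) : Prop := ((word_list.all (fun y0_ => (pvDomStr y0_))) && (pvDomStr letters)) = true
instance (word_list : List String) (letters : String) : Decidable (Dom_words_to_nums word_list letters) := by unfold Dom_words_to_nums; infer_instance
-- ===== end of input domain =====

-- B replaces A's suffix recursion with an iterative front-to-back product with pruning (alternative decomposition, same cost).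


-- ===== PORT A =====
-- char_list construction (identical source loop in Source A and Source B, so shared):
-- for i in range(len(letters)): char = letters[i]; char_list.setdefault(char, []); char_list[char].append(i)
-- (setdefault-then-append is exactly Dict.modify with default []; letters[i] is always in range here,
--  so the pyGet? guard's default branch is unreachable — a totality guard only)
def pvCharList (letters : String) : PySem.Dict Char (List Int) :=
  (PySem.List.pyRange 0 (PySem.Str.len letters) 1).foldl
    (fun d i => d.modify ((PySem.Str.pyGet? letters i).getD ' ') [] (fun l => l ++ [i]))
    PySem.Dict.empty

-- _expand_number_list, step for step
def pvExpand : List (List Int) → List (List Int)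
  | [] => []
  | [l0] => l0.map (fun num => [num])
  | l0 :: rest =>
    let expanded_sub_list := pvExpand rest
    l0.foldl (fun acc num =>
      expanded_sub_list.foldl (fun acc2 l => if num ∉ l then acc2 ++ [num :: l] else acc2) acc) []

-- word_to_nums; char_list[char] raises KeyError on a missing key in Python — excluded by Pre_ (getD [] is a totality guard there)
def pvWordToNums (word : String) (char_list : PySem.Dict Char (List Int)) : List (List Int) :=
  let number_lists := word.toList.foldl (fun acc char => acc ++ [char_list.getD char []]) []
  pvExpand number_lists

def words_to_nums (word_list : List String) (letters : String) : List (List Int) :=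
  let char_list := pvCharList letters
  word_list.foldl (fun number_list word => number_list ++ pvWordToNums word char_list) []

-- ===== PORT B =====
def words_to_nums_alt (word_list : List String) (letters : String) : List (List Int) :=
  let char_list := pvCharList letters
  word_list.foldl (fun number_list word =>
    if word.toList.isEmpty then number_list
    else number_list ++ word.toList.foldl
      (fun partials char =>
        partials.flatMap (fun p =>
          ((char_list.getD char []).filter (fun n => !p.contains n)).map (fun n => p ++ [n])))
      [[]]) []

-- ===== PRECONDITION & SPEC =====
-- Pre_ excludes exactly the inputs on which A raises KeyError: a word containing a character not in letters.
def Pre_words_to_nums (word_list : List String) (letters : String) : Prop :=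
  (word_list.all (fun w => w.toList.all (fun c => letters.toList.contains c))) = true
instance (word_list : List String) (letters : String) : Decidable (Pre_words_to_nums word_list letters) := by unfold Pre_words_to_nums; infer_instance
def pvWitness_words_to_nums : List String × String := ([], "")

def Spec_words_to_nums (word_list : List String) (letters : String) (out : List (List Int)) : Prop := out = words_to_nums_alt word_list letters
instance (word_list : List String) (letters : String) (out : List (List Int)) : Decidable (Spec_words_to_nums word_list letters out) := by unfold Spec_words_to_nums; infer_instance

-- ===== CLAIM (what is proved, stated in full; the proofs are below) =====
def Claim_equal_words_to_nums : Prop := ∀ (word_list : List String) (letters : String), Dom_words_to_nums word_list letters → Pre_words_to_nums word_list letters → Spec_words_to_nums word_list letters (words_to_nums word_list letters)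

-- ===== LEMMAS AND PROOFS =====

-- the full cartesian product of the choice lists, first position varying slowest
def pvCart : List (List Int) → List (List Int)
  | [] => [[]]
  | xs :: rest => xs.flatMap (fun n => (pvCart rest).map (fun l => n :: l))

-- Boolean all-distinct test
def pvAllDiff : List Int → Bool
  | [] => true
  | n :: l => !l.contains n && pvAllDiff l

theorem pvAllDiff_eq (l : List Int) : pvAllDiff l = decide l.Nodup := by
  induction l with
  | nil => simp [pvAllDiff]
  | cons n l ih => simp [pvAllDiff, ih, List.nodup_cons]

theorem pvAllDiff_snoc (p : List Int) (n : Int) :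
    pvAllDiff (p ++ [n]) = (!p.contains n && pvAllDiff p) := by
  simp only [pvAllDiff_eq, List.contains_eq_mem]
  rw [show (!decide (n ∈ p) && decide p.Nodup) = decide (n ∉ p ∧ p.Nodup) by simp]
  rw [decide_eq_decide, show p ++ [n] = p ++ n :: [] from rfl, List.nodup_middle]
  simp [List.nodup_cons]

theorem pvFlatMap_box (xs : List Int) :
    xs.flatMap (fun n => [[n]]) = xs.map (fun n => [n]) := by
  induction xs with
  | nil => rfl
  | cons a xs ih => simp [ih]

theorem pvFilter_flatMap_box (l0 : List Int) :
    (l0.flatMap (fun n => [[n]])).filter pvAllDiff = l0.map (fun n => [n]) := by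
  induction l0 with
  | nil => rfl
  | cons a l0 ih => simp [pvAllDiff, ih]

theorem pvCart_snoc (ls : List (List Int)) (xs : List Int) :
    pvCart (ls ++ [xs]) = (pvCart ls).flatMap (fun p => xs.map (fun n => p ++ [n])) := by
  induction ls with
  | nil => simp [pvCart, pvFlatMap_box]
  | cons l0 rest ih =>
    simp [List.cons_append, pvCart, ih, List.map_flatMap, List.flatMap_assoc,
      List.flatMap_map, List.map_map, Function.comp_def]

theorem pvFlatMap_over_filter {α β : Type} (l : List α) (q : α → Bool) (g g' : α → List β)
    (htrue : ∀ a ∈ l, q a = true → g a = g' a) (hfalse : ∀ a ∈ l, q a = false → g' a = []) :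
    (l.filter q).flatMap g = l.flatMap g' := by
  induction l with
  | nil => rfl
  | cons a l ih =>
    have ih' := ih (fun x hx => htrue x (List.mem_cons_of_mem _ hx))
      (fun x hx => hfalse x (List.mem_cons_of_mem _ hx))
    cases hq : q a with
    | false =>
      rw [List.filter_cons_of_neg (by simp [hq]), List.flatMap_cons,
        hfalse a (by simp) hq, List.nil_append, ih']
    | true =>
      rw [List.filter_cons_of_pos (by simp [hq]), List.flatMap_cons, List.flatMap_cons,
        htrue a (by simp) hq, ih']

-- A's recursion computes the all-distinct tuples of the product, in product order
theorem pvExpand_eq_filter (ls : List (List Int)) :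
    ls ≠ [] → pvExpand ls = (pvCart ls).filter pvAllDiff := by
  induction ls with
  | nil => intro h; exact absurd rfl h
  | cons l0 rest ih =>
    intro _
    cases rest with
    | nil =>
      simp only [pvExpand]
      rw [show pvCart [l0] = l0.flatMap (fun n => [[n]]) from rfl, pvFilter_flatMap_box]
    | cons l1 rest' =>
      have hsub := ih (by simp)
      simp only [pvExpand]
      rw [hsub]
      have hinner : ∀ (acc : List (List Int)) (num : Int),
          (((pvCart (l1 :: rest')).filter pvAllDiff).foldl
            (fun acc2 l => if num ∉ l then acc2 ++ [num :: l] else acc2) acc)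
          = acc ++ (((pvCart (l1 :: rest')).filter pvAllDiff).filter
              (fun l => decide (num ∉ l))).map (fun l => num :: l) := by
        intro acc num
        rw [PySem.List.foldl_append_ite (p := fun l => num ∉ l) (f := fun l => num :: l)]
      simp only [hinner]
      rw [PySem.List.foldl_append_eq_flatMap
        (g := fun num => (((pvCart (l1 :: rest')).filter pvAllDiff).filter
          (fun l => decide (num ∉ l))).map (fun l => num :: l)), List.nil_append]
      rw [show pvCart (l0 :: l1 :: rest')
            = l0.flatMap (fun n => (pvCart (l1 :: rest')).map (fun l => n :: l)) from rfl]
      rw [List.filter_flatMap]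
      refine List.flatMap_congr ?_
      intro num _
      rw [List.filter_map, List.filter_filter]
      congr 1
      refine List.filter_congr ?_
      intro l _
      simp [pvAllDiff, Function.comp, List.contains_eq_mem]

-- B's inner loop maintains exactly the all-distinct prefixes of the product built so far
theorem pvPartials_eq_filter (f : Char → List Int) (cs : List Char) :
    cs.foldl (fun partials char =>
        partials.flatMap (fun p =>
          ((f char).filter (fun n => !p.contains n)).map (fun n => p ++ [n]))) [[]]
      = (pvCart (cs.map f)).filter pvAllDiff := by
  induction cs using List.reverseRecOn with
  | nil => simp [pvCart, pvAllDiff]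
  | append_singleton cs c ih =>
    rw [List.foldl_append, List.foldl_cons, List.foldl_nil, ih]
    simp only [List.map_append, List.map_cons, List.map_nil]
    rw [pvCart_snoc, List.filter_flatMap]
    refine pvFlatMap_over_filter _ pvAllDiff _ _ ?_ ?_
    · intro p _ hp
      rw [List.filter_map]
      congr 1
      refine List.filter_congr ?_
      intro n _
      simp [Function.comp, pvAllDiff_snoc, hp]
    · intro p _ hp
      simp [List.filter_map, Function.comp, pvAllDiff_snoc, hp]

theorem words_to_nums_eq (word_list : List String) (letters : String) :
    words_to_nums word_list letters = words_to_nums_alt word_list letters := by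
  simp only [words_to_nums, words_to_nums_alt]
  induction word_list using List.reverseRecOn with
  | nil => rfl
  | append_singleton ws w ih =>
    rw [List.foldl_append, List.foldl_append, List.foldl_cons, List.foldl_cons,
      List.foldl_nil, List.foldl_nil, ih]
    by_cases hw : w.toList.isEmpty
    · have hnil : w.toList = [] := by simpa [List.isEmpty_iff] using hw
      simp [pvWordToNums, hnil, pvExpand]
    · have hne : w.toList ≠ [] := by simpa [List.isEmpty_iff] using hw
      rw [if_neg (by simpa using hw)]
      congr 1
      simp only [pvWordToNums]
      rw [PySem.List.foldl_append_singleton_eq_map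
        (f := fun char => (pvCharList letters).getD char []), List.nil_append,
        pvExpand_eq_filter _ (by simpa using hne),
        pvPartials_eq_filter (fun char => (pvCharList letters).getD char []) w.toList]

-- ===== VERDICT (by name: the statement is the Claim_ definition above) =====
theorem words_to_nums_spec : Claim_equal_words_to_nums := by
  intro word_list letters _ _
  unfold Spec_words_to_nums
  exact words_to_nums_eq word_list letters
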